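-- pv_equiv track=rewrite | github.com/WilliamWallitt/AICourseWork_Full | 8_puzzle.py | checkUserMatrixIsValid
-- ===== SOURCE A (Python) =====
-- def checkUserMatrixIsValid(start_matrix, end_matrix, grid_size):
--
--     num = [x for x in range((grid_size ** 2))]
--     start_test = []
--     end_test = []
--
--     for row in start_matrix:
--         for item in row:
--             start_test.append(item)
--
--     for row in end_matrix:
--         for item in row:
--             end_test.append(item)
--
--     if num == sorted(start_test) and num == sorted(end_test):
--
--         return True
--
--     else:
--
--         return False
-- ===== SOURCE B (Python) =====
-- def checkUserMatrixIsValid(start_matrix, end_matrix, grid_size):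
--     k = grid_size ** 2
--     return _is_perm_of_range(start_matrix, k) and _is_perm_of_range(end_matrix, k)
--
--
-- def _is_perm_of_range(matrix, k):
--     # single validating pass: every entry in [0, k), no duplicates, exactly k entries
--     seen = set()
--     count = 0
--     for item in (x for row in matrix for x in row):
--         if not (0 <= item < k) or item in seen:
--             return False
--         seen.add(item)
--         count += 1
--     return count == k
-- ===== Notes on version B (the rewrite author's own statement) =====
-- stated objective: alternative
-- what changed: Replaces build-range-then-sort-and-compare with a single validating pass per matrix using a seen-set (bounds check, duplicate check, element count) that exits early on the first invalid entry.
import Mathlib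
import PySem

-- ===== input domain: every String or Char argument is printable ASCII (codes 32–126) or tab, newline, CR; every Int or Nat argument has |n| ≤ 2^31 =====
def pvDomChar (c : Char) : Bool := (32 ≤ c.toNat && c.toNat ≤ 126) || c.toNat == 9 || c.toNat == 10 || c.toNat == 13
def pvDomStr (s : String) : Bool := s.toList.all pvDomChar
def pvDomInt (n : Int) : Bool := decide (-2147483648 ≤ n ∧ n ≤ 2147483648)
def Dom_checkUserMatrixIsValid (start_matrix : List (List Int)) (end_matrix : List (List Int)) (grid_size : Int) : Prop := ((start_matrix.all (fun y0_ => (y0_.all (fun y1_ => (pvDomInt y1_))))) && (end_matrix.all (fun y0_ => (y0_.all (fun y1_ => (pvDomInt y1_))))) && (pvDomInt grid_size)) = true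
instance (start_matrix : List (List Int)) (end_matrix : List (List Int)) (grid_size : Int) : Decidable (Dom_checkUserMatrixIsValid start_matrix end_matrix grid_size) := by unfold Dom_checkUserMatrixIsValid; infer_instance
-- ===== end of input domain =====

-- B replaces A's build-range-then-sort-and-compare with a single validating pass per matrix
-- (bounds check, seen-set duplicate check, element count) — a different algorithm of similar cost.


-- ===== PORT A =====
def checkUserMatrixIsValid (start_matrix : List (List Int)) (end_matrix : List (List Int)) (grid_size : Int) : Bool :=
  let num := (PySem.List.pyRange 0 (grid_size ^ 2) 1).map (fun x => x)
  let start_test := start_matrix.foldl (fun acc row => row.foldl (fun a item => a ++ [item]) acc) []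
  let end_test := end_matrix.foldl (fun acc row => row.foldl (fun a item => a ++ [item]) acc) []
  if num = PySem.List.sorted start_test (fun x => x) false ∧ num = PySem.List.sorted end_test (fun x => x) false
  then true else false

-- ===== PORT B =====
-- the 'for item in (x for row in matrix for x in row)' loop of _is_perm_of_range, with early return False
def pvCheckLoop (k : Int) : List Int → PySem.Set Int → Int → Bool
  | [], _, count => count == k
  | item :: rest, seen, count =>
      if ¬ (0 ≤ item ∧ item < k) ∨ item ∈ seen then false
      else pvCheckLoop k rest (PySem.Set.add seen item) (count + 1)

def pvIsPermOfRange (matrix : List (List Int)) (k : Int) : Bool :=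
  pvCheckLoop k (matrix.flatMap (fun row => row)) PySem.Set.empty 0

def checkUserMatrixIsValid_alt (start_matrix : List (List Int)) (end_matrix : List (List Int)) (grid_size : Int) : Bool :=
  let k := grid_size ^ 2
  pvIsPermOfRange start_matrix k && pvIsPermOfRange end_matrix k

-- ===== PRECONDITION & SPEC =====
def Spec_checkUserMatrixIsValid (start_matrix : List (List Int)) (end_matrix : List (List Int)) (grid_size : Int) (out : Bool) : Prop := out = checkUserMatrixIsValid_alt start_matrix end_matrix grid_size
instance (start_matrix : List (List Int)) (end_matrix : List (List Int)) (grid_size : Int) (out : Bool) : Decidable (Spec_checkUserMatrixIsValid start_matrix end_matrix grid_size out) := by unfold Spec_checkUserMatrixIsValid; infer_instance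

-- ===== CLAIM (what is proved, stated in full; the proofs are below) =====
def Claim_equal_checkUserMatrixIsValid : Prop := ∀ (start_matrix : List (List Int)) (end_matrix : List (List Int)) (grid_size : Int), Dom_checkUserMatrixIsValid start_matrix end_matrix grid_size → Spec_checkUserMatrixIsValid start_matrix end_matrix grid_size (checkUserMatrixIsValid start_matrix end_matrix grid_size)

-- ===== LEMMAS AND PROOFS =====

-- A's nested append loop flattens the matrix
lemma pvFlatten_eq (m : List (List Int)) :
    m.foldl (fun acc row => row.foldl (fun a item => a ++ [item]) acc) [] = m.flatMap (fun row => row) := by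
  rw [PySem.List.foldl_congr_mem m
      (fun acc row => row.foldl (fun a item => a ++ [item]) acc)
      (fun acc row => acc ++ row) []
      (fun acc row _ => PySem.List.foldl_append_singleton_eq_self row acc),
    PySem.List.foldl_append_eq_flatMap]
  simp

-- characterisation of B's validating loop
lemma pvCheckLoop_spec (k : Int) (xs : List Int) (seen : PySem.Set Int) (count : Int) :
    pvCheckLoop k xs seen count = true ↔
      ((∀ x ∈ xs, 0 ≤ x ∧ x < k) ∧ xs.Nodup ∧ (∀ x ∈ xs, x ∉ seen) ∧ count + xs.length = k) := by
  induction xs generalizing seen count with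
  | nil => simp [pvCheckLoop]
  | cons x rest ih =>
    simp only [pvCheckLoop]
    split_ifs with h
    · simp only [false_iff]
      rintro ⟨hb, _, hs, _⟩
      rcases h with h | h
      · exact h (hb x (by simp))
      · exact hs x (by simp) h
    · push Not at h
      rw [ih]
      constructor
      · rintro ⟨hb, hnd, hs, hc⟩
        refine ⟨?_, ?_, ?_, ?_⟩
        · intro y hy
          rcases List.mem_cons.mp hy with rfl | hy
          · exact h.1
          · exact hb y hy
        · exact List.nodup_cons.mpr
            ⟨fun hx => hs x hx ((PySem.Set.mem_add seen x x).mpr (Or.inr rfl)), hnd⟩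
        · intro y hy
          rcases List.mem_cons.mp hy with rfl | hy
          · exact h.2
          · exact fun hys => hs y hy ((PySem.Set.mem_add seen x y).mpr (Or.inl hys))
        · simp only [List.length_cons] at *; omega
      · rintro ⟨hb, hnd, hs, hc⟩
        refine ⟨fun y hy => hb y (by simp [hy]), (List.nodup_cons.mp hnd).2, ?_, ?_⟩
        · intro y hy hmem
          rcases (PySem.Set.mem_add seen x y).mp hmem with hmem | rfl
          · exact hs y (by simp [hy]) hmem
          · exact (List.nodup_cons.mp hnd).1 hy
        · simp only [List.length_cons] at hc; omega

-- per-matrix bridge: "sorted(flat) == list(range(k))" is exactly B's validating pass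
lemma pvBridge (k : Int) (hk : 0 ≤ k) (xs : List Int) :
    decide ((PySem.List.pyRange 0 k 1).map (fun x => x) = PySem.List.sorted xs (fun x => x) false)
      = pvCheckLoop k xs PySem.Set.empty 0 := by
  rw [List.map_id']
  cases hb : pvCheckLoop k xs PySem.Set.empty 0
  · rw [decide_eq_false_iff_not]
    intro heq
    have hperm : (PySem.List.pyRange 0 k 1).Perm xs :=
      heq ▸ (PySem.List.sorted_perm xs (fun x => x) false)
    have ht : pvCheckLoop k xs PySem.Set.empty 0 = true := by
      rw [pvCheckLoop_spec]
      refine ⟨?_, ?_, ?_, ?_⟩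
      · intro x hx
        exact (PySem.List.mem_pyRange_one.mp (hperm.mem_iff.mpr hx))
      · exact hperm.nodup_iff.mp (PySem.List.nodup_pyRange_one 0 k)
      · intro x _ hx; simp [PySem.Set.empty] at hx
      · have := hperm.length_eq
        rw [PySem.List.length_pyRange_one] at this
        omega
    exact Bool.false_ne_true (hb.symm.trans ht)
  · rw [decide_eq_true_iff]
    rw [pvCheckLoop_spec] at hb
    obtain ⟨hbnd, hnd, -, hlen⟩ := hb
    have hnd' := PySem.List.nodup_pyRange_one (0 : Int) k
    have hsub : xs.toFinset ⊆ (PySem.List.pyRange 0 k 1).toFinset := by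
      intro x hx
      rw [List.mem_toFinset] at *
      exact PySem.List.mem_pyRange_one.mpr (hbnd x hx)
    have hcard : (PySem.List.pyRange 0 k 1).toFinset.card ≤ xs.toFinset.card := by
      rw [List.toFinset_card_of_nodup hnd, List.toFinset_card_of_nodup hnd',
        PySem.List.length_pyRange_one]
      omega
    have hfin := Finset.eq_of_subset_of_card_le hsub hcard
    have hperm : (PySem.List.pyRange 0 k 1).Perm xs :=
      List.perm_of_nodup_nodup_toFinset_eq hnd' hnd hfin.symm
    exact (PySem.List.sorted_eq_of_perm_of_pairwise_lt _ _ _ hperm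
      (PySem.List.pairwise_lt_pyRange_one 0 k)).symm

-- ===== VERDICT (by name: the statement is the Claim_ definition above) =====
theorem checkUserMatrixIsValid_spec : Claim_equal_checkUserMatrixIsValid := by
  intro s e g _
  unfold Spec_checkUserMatrixIsValid checkUserMatrixIsValid checkUserMatrixIsValid_alt pvIsPermOfRange
  simp only [pvFlatten_eq]
  have hk : (0 : Int) ≤ g ^ 2 := sq_nonneg g
  have h1 := pvBridge (g ^ 2) hk (s.flatMap (fun row => row))
  have h2 := pvBridge (g ^ 2) hk (e.flatMap (fun row => row))
  rw [← h1, ← h2]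
  by_cases hP : (PySem.List.pyRange 0 (g ^ 2) 1).map (fun x => x)
      = PySem.List.sorted (s.flatMap (fun row => row)) (fun x => x) false <;>
    by_cases hQ : (PySem.List.pyRange 0 (g ^ 2) 1).map (fun x => x)
      = PySem.List.sorted (e.flatMap (fun row => row)) (fun x => x) false <;>
    simp [hP, hQ]
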